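-- pv_equiv track=rewrite | github.com/sergey-automation/ocr-book-clustering | EXPORT/build_cluster_tree_exports.py | strip_known_extensions
-- ===== SOURCE A (Python) =====
-- def strip_known_extensions(filename: str) -> str:
--     name = filename
--     known = [
--         ".pdf", ".djvu", ".tif", ".tiff", ".txt", ".doc", ".docx", ".rtf", ".fb2",
--         ".epub", ".html", ".htm", ".md", ".csv", ".json", ".jsonl", ".xml",
--     ]
--     changed = True
--     while changed:
--         changed = False
--         lower = name.lower()
--         for ext in known:
--             if lower.endswith(ext):
--                 name = name[:-len(ext)]
--                 changed = True
--                 break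
--     return name
-- ===== SOURCE B (Python) =====
-- KNOWN_EXTS = {
--     ".pdf", ".djvu", ".tif", ".tiff", ".txt", ".doc", ".docx", ".rtf", ".fb2",
--     ".epub", ".html", ".htm", ".md", ".csv", ".json", ".jsonl", ".xml",
-- }
--
--
-- def strip_known_extensions(filename: str) -> str:
--     tokens = filename.split('.')
--     while len(tokens) > 1 and '.' + tokens[-1].lower() in KNOWN_EXTS:
--         tokens.pop()
--     return '.'.join(tokens)
-- ===== Notes on version B (the rewrite author's own statement) =====
-- stated objective: alternative
-- what changed: B tokenizes the filename once on the dot separator and pops trailing tokens whose lowercased dotted form is in a precomputed extension set, joining back at the end, instead of A's repeated whole-string lower()+endswith scan over the extension list on every iteration.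
import Mathlib
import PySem

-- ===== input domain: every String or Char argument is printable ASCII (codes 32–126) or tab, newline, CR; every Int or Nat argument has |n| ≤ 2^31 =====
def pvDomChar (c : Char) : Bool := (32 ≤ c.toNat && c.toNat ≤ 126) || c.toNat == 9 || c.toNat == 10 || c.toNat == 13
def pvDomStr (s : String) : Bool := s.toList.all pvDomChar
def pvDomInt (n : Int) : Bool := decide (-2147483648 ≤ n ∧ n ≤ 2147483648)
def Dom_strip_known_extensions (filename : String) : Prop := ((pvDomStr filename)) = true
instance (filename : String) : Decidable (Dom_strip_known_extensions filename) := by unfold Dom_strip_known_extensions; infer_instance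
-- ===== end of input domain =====

-- B tokenizes once on '.' and pops trailing known-extension tokens; A repeatedly lowercases and endswith-scans the whole string (alternative decomposition, return value only).

-- ===== PORT A =====
-- A's 'known' list of extensions
def pvKnownA : List (List Char) :=
  [".pdf".toList, ".djvu".toList, ".tif".toList, ".tiff".toList, ".txt".toList, ".doc".toList,
   ".docx".toList, ".rtf".toList, ".fb2".toList, ".epub".toList, ".html".toList, ".htm".toList,
   ".md".toList, ".csv".toList, ".json".toList, ".jsonl".toList, ".xml".toList]

-- A's inner 'for ext in known: … break' pass: first matching ext strips, else none
def pvTryStrip (lowerName name : List Char) : List (List Char) → Option (List Char)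
  | [] => none
  | ext :: rest =>
      if PySem.Chars.endswith lowerName ext then
        some (PySem.Chars.slice name none (some (-(ext.length : Int))))
      else pvTryStrip lowerName name rest

-- termination fact for A's while loop (a successful strip shortens the name)
theorem pvTryStrip_lt (name n : List Char) :
    ∀ known : List (List Char), (∀ e ∈ known, e ≠ []) →
      pvTryStrip (PySem.Chars.lower name) name known = some n → n.length < name.length := by
  intro known
  induction known with
  | nil => intro _ h; simp [pvTryStrip] at h
  | cons ext rest ih =>
      intro hne h
      simp only [pvTryStrip] at h
      split_ifs at h with hew
      · have hsuf : ext <:+ PySem.Chars.lower name := (PySem.Chars.endswith_iff _ _).mp hew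
        have hlen : ext.length ≤ name.length := by
          have := hsuf.length_le
          simpa [PySem.Chars.lower] using this
        have hexte : ext ≠ [] := hne ext (by simp)
        have hpos : 0 < ext.length := List.length_pos_iff.mpr hexte
        simp only [Option.some.injEq] at h
        subst h
        simp only [PySem.Chars.slice_eq_listSlice]
        have : PySem.List.slice name none (some (-(ext.length : Int))) =
            name.take (name.length - ext.length) := by
          simp [PySem.List.slice, PySem.List.clampIdx]
          split_ifs <;> omega
        rw [this]
        simp [List.length_take]
        omega
      · exact ih (fun e he => hne e (by simp [he])) h

-- A's 'while changed:' loop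
def pvStripCore (name : List Char) : List Char :=
  match h : pvTryStrip (PySem.Chars.lower name) name pvKnownA with
  | some n => pvStripCore n
  | none => name
termination_by name.length
decreasing_by exact pvTryStrip_lt name n pvKnownA (by decide) h

def strip_known_extensions (filename : String) : String :=
  String.ofList (pvStripCore filename.toList)

-- ===== PORT B =====
-- B's KNOWN_EXTS set
def pvKnownSet : PySem.Set (List Char) :=
  PySem.Set.ofList
    [".pdf".toList, ".djvu".toList, ".tif".toList, ".tiff".toList, ".txt".toList, ".doc".toList,
     ".docx".toList, ".rtf".toList, ".fb2".toList, ".epub".toList, ".html".toList, ".htm".toList,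
     ".md".toList, ".csv".toList, ".json".toList, ".jsonl".toList, ".xml".toList]

-- B's 'while … : tokens.pop()' loop
def pvPopLoop (tokens : List (List Char)) : List (List Char) :=
  if 1 < tokens.length ∧ ('.' :: PySem.Chars.lower (tokens.getLastD [])) ∈ pvKnownSet then
    pvPopLoop tokens.dropLast
  else tokens
termination_by tokens.length
decreasing_by simp only [List.length_dropLast]; omega

def strip_known_extensions_alt (filename : String) : String :=
  String.ofList (PySem.Chars.join ['.'] (pvPopLoop (PySem.Chars.splitOn filename.toList ['.'])))

-- ===== PRECONDITION & SPEC =====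
def Spec_strip_known_extensions (filename : String) (out : String) : Prop := out = strip_known_extensions_alt filename
instance (filename : String) (out : String) : Decidable (Spec_strip_known_extensions filename out) := by unfold Spec_strip_known_extensions; infer_instance

-- ===== CLAIM (what is proved, stated in full; the proofs are below) =====
def Claim_equal_strip_known_extensions : Prop := ∀ (filename : String), Dom_strip_known_extensions filename → Spec_strip_known_extensions filename (strip_known_extensions filename)

-- ===== LEMMAS AND PROOFS =====

-- lowercasing cannot create a '.'
theorem pvLowerChar_dot {c : Char} (h : PySem.Chars.lowerChar c = '.') : c = '.' := by
  unfold PySem.Chars.lowerChar PySem.Chars.isupper at h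
  split_ifs at h with h1
  · exfalso
    simp only [Bool.and_eq_true, decide_eq_true_eq] at h1
    have hl : 65 ≤ c.toNat := Fin.mk_le_mk.mp h1.1
    have hu : c.toNat ≤ 90 := Fin.mk_le_mk.mp h1.2
    have h2 := congrArg Char.toNat h
    rw [Char.toNat_ofNat] at h2
    have hv : (c.toNat + 32).isValidChar := by
      left; omega
    simp [hv, show ('.').toNat = 46 from rfl] at h2
    omega
  · exact h

theorem pvLower_dot_free {t : List Char} (h : '.' ∉ t) : '.' ∉ PySem.Chars.lower t := by
  simp only [PySem.Chars.lower, List.mem_map]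
  rintro ⟨c, hc, hl⟩
  exact h (pvLowerChar_dot hl ▸ hc)

theorem pvLower_append_dot (X t : List Char) :
    PySem.Chars.lower (X ++ '.' :: t) = PySem.Chars.lower X ++ '.' :: PySem.Chars.lower t := by
  simp [PySem.Chars.lower, PySem.Chars.lowerChar, PySem.Chars.isupper]

-- '.'-terminated prefix matching: a ++ ['.'] prefixes b ++ '.'::s iff a = b (a, b dot-free)
theorem pvPrefix_dot : ∀ (a b s : List Char), '.' ∉ a → '.' ∉ b →
    (a ++ ['.'] <+: b ++ '.' :: s ↔ a = b) := by
  intro a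
  induction a with
  | nil =>
      intro b s _ hb
      cases b with
      | nil => simp
      | cons c b' =>
          simp only [List.nil_append, List.cons_append, List.cons_prefix_cons]
          constructor
          · rintro ⟨h1, _⟩; exact absurd h1.symm (by intro h; exact hb (h ▸ List.mem_cons_self))
          · intro h; exact absurd h (by simp)
  | cons x a' ih =>
      intro b s ha hb
      cases b with
      | nil =>
          simp only [List.cons_append, List.nil_append, List.cons_prefix_cons]
          constructor
          · rintro ⟨h1, _⟩; exact absurd h1 (by intro h; exact ha (h ▸ List.mem_cons_self))
          · intro h; exact absurd h (by simp)
      | cons c b' =>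
          simp only [List.cons_append, List.cons_prefix_cons, List.cons.injEq]
          constructor
          · rintro ⟨h1, h2⟩
            exact ⟨h1, ((ih b' s (fun h => ha (List.mem_cons_of_mem _ h))
              (fun h => hb (List.mem_cons_of_mem _ h))).mp h2)⟩
          · rintro ⟨h1, h2⟩
            exact ⟨h1, (ih b' s (fun h => ha (List.mem_cons_of_mem _ h))
              (fun h => hb (List.mem_cons_of_mem _ h))).mpr h2⟩

-- suffix version: '.'::e suffixes X ++ '.'::t iff e = t (e, t dot-free)
theorem pvSuffix_dot (e t X : List Char) (he : '.' ∉ e) (ht : '.' ∉ t) :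
    ('.' :: e <:+ X ++ '.' :: t ↔ e = t) := by
  rw [← List.reverse_prefix]
  have h1 : ('.' :: e).reverse = e.reverse ++ ['.'] := by simp
  have h2 : (X ++ '.' :: t).reverse = t.reverse ++ '.' :: X.reverse := by simp
  rw [h1, h2, pvPrefix_dot e.reverse t.reverse X.reverse (by simpa using he) (by simpa using ht)]
  constructor
  · intro h; simpa using congrArg List.reverse h
  · intro h; simp [h]

theorem pvModifyHead_id (l : List (List Char)) : l.modifyHead (fun x => x) = l := by
  cases l <;> rfl

-- PySem split on '.' is Mathlib's splitOn
theorem pvGo_eq : ∀ (fuel : Nat) (l cur : List Char) (acc : List (List Char)), l.length ≤ fuel →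
    PySem.Chars.splitOn.go ['.'] fuel l cur acc =
      acc.reverse ++ (l.splitOnP (· == '.')).modifyHead (cur.reverse ++ ·) := by
  intro fuel
  induction fuel with
  | zero =>
      intro l cur acc hl
      have : l = [] := List.eq_nil_of_length_eq_zero (Nat.le_zero.mp hl)
      subst this
      simp [PySem.Chars.splitOn.go, List.splitOnP_nil]
  | succ f ih =>
      intro l cur acc hl
      cases l with
      | nil => simp [PySem.Chars.splitOn.go, List.splitOnP_nil]
      | cons c rest =>
          rw [PySem.Chars.splitOn.go]
          by_cases hc : c = '.'
          · subst hc
            rw [if_pos (by simp [List.isPrefixOf])]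
            simp only [List.length_singleton, List.drop_one, List.tail_cons]
            rw [ih rest [] ((cur.reverse) :: acc) (by simpa using Nat.le_of_succ_le_succ hl)]
            simp [List.splitOnP_cons, pvModifyHead_id]
          · rw [if_neg (by simp [List.isPrefixOf]; exact fun h => hc h.symm)]
            rw [ih rest (c :: cur) acc (by simpa using Nat.le_of_succ_le_succ hl)]
            simp [List.splitOnP_cons, hc, List.modifyHead_modifyHead, Function.comp_def]

theorem pvSplitOn_dot (cs : List Char) :
    PySem.Chars.splitOn cs ['.'] = cs.splitOnP (· == '.') := by
  unfold PySem.Chars.splitOn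
  rw [pvGo_eq (cs.length + 1) cs [] [] (by omega)]
  simp [pvModifyHead_id]

-- tokens produced by splitOn are dot-free
theorem pvSplit_dot_free : ∀ (cs : List Char), ∀ t ∈ cs.splitOnP (· == '.'), '.' ∉ t := by
  intro cs
  induction cs with
  | nil => intro t ht; simp [List.splitOnP_nil] at ht; simp [ht]
  | cons c rest ih =>
      intro t ht
      rw [List.splitOnP_cons] at ht
      by_cases hc : c = '.'
      · simp [hc] at ht
        rcases ht with h | h
        · simp [h]
        · exact ih t h
      · simp [hc] at ht
        obtain ⟨h0, t0, he⟩ := List.exists_cons_of_ne_nil (List.splitOnP_ne_nil (· == '.') rest)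
        rw [he] at ht
        simp at ht
        rcases ht with h | h
        · subst h
          intro hmem
          rcases List.mem_cons.mp hmem with h | h
          · exact hc h.symm
          · exact ih h0 (by rw [he]; exact List.mem_cons_self) h
        · exact ih t (by rw [he]; exact List.mem_cons_of_mem _ h)

-- intercalate snoc
theorem pvInter_snoc : ∀ (ts : List (List Char)) (t : List Char), ts ≠ [] →
    ['.'].intercalate (ts ++ [t]) = ['.'].intercalate ts ++ '.' :: t := by
  intro ts
  induction ts with
  | nil => intro t h; exact absurd rfl h
  | cons a rest ih =>
      intro t _
      cases rest with
      | nil => simp [List.intercalate, List.intersperse]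
      | cons b l =>
          have h1 : ['.'].intercalate ((a :: b :: l) ++ [t]) =
              a ++ ['.'] ++ ['.'].intercalate ((b :: l) ++ [t]) := by
            simp [List.intercalate, List.intersperse]
          have h2 : ['.'].intercalate (a :: b :: l) = a ++ ['.'] ++ ['.'].intercalate (b :: l) := by
            simp [List.intercalate, List.intersperse]
          rw [h1, ih t (by simp), h2]
          simp

-- the slice name[:-k]
theorem pvSlice_neg (xs : List Char) (k : Nat) (h1 : 0 < k) (h2 : k ≤ xs.length) :
    PySem.List.slice xs none (some (-(k : Int))) = xs.take (xs.length - k) := by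
  simp [PySem.List.slice, PySem.List.clampIdx]
  split_ifs <;> omega

-- characterization of A's inner pass on a name whose lowercase splits as X ++ '.'::t
theorem pvTryStrip_char : ∀ (known : List (List Char)),
    (∀ ext ∈ known, ∃ e, ext = '.' :: e ∧ '.' ∉ e) →
    ∀ (X t name : List Char), PySem.Chars.lower name = X ++ '.' :: t → '.' ∉ t →
    pvTryStrip (PySem.Chars.lower name) name known =
      if ('.' :: t) ∈ known then
        some (PySem.Chars.slice name none (some (-((t.length : Int) + 1))))
      else none := by
  intro known
  induction known with
  | nil => intro _ X t name _ _; simp [pvTryStrip]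
  | cons ext rest ih =>
      intro hk X t name hl ht
      obtain ⟨e, hee, hef⟩ := hk ext (by simp)
      simp only [pvTryStrip]
      by_cases hm : PySem.Chars.endswith (PySem.Chars.lower name) ext = true
      · have hsuf : ext <:+ PySem.Chars.lower name := (PySem.Chars.endswith_iff _ _).mp hm
        rw [hee, hl] at hsuf
        have heq : e = t := (pvSuffix_dot e t X hef ht).mp hsuf
        subst heq
        rw [if_pos hm, if_pos (by rw [hee]; exact List.mem_cons_self)]
        rw [hee]
        norm_num
      · rw [if_neg (by simpa using hm)]
        have hne : ext ≠ '.' :: t := by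
          intro h
          apply hm
          rw [(PySem.Chars.endswith_iff _ _), h, hl]
          exact (pvSuffix_dot t t X ht ht).mpr rfl
        rw [ih (fun x hx => hk x (List.mem_cons_of_mem _ hx)) X t name hl ht]
        by_cases hmem : ('.' :: t) ∈ rest
        · rw [if_pos hmem, if_pos (List.mem_cons_of_mem _ hmem)]
        · rw [if_neg hmem, if_neg (by simp [hmem]; exact fun h => hne h.symm)]

-- A's while loop: one-step unfoldings
theorem pvStripCore_some {name n : List Char}
    (h : pvTryStrip (PySem.Chars.lower name) name pvKnownA = some n) :
    pvStripCore name = pvStripCore n := by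
  rw [pvStripCore]
  split
  · rename_i m hm
    rw [hm] at h
    cases h
    rfl
  · rename_i hm; rw [hm] at h; exact absurd h (by simp)

theorem pvStripCore_none {name : List Char}
    (h : pvTryStrip (PySem.Chars.lower name) name pvKnownA = none) :
    pvStripCore name = name := by
  rw [pvStripCore]
  split
  · rename_i m hm; rw [hm] at h; exact absurd h (by simp)
  · rfl

-- the two known-extension containers hold the same lists
theorem pvKnown_eq : pvKnownSet = pvKnownA := by decide

theorem pvKnownA_shape : ∀ ext ∈ pvKnownA, ∃ e, ext = '.' :: e ∧ '.' ∉ e := by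
  intro ext hx
  fin_cases hx <;> exact ⟨_, rfl, by decide⟩

-- main bridge: on dot-free token lists, A's loop over the joined string is B's pop loop
-- A's inner pass finds nothing when no extension is a suffix of the lowered name
theorem pvTryStrip_none (L name : List Char) : ∀ known : List (List Char),
    (∀ ext ∈ known, ¬ ext <:+ L) → pvTryStrip L name known = none := by
  intro known
  induction known with
  | nil => intro _; rfl
  | cons ext rest ih =>
      intro h
      simp only [pvTryStrip]
      rw [if_neg (by simpa [PySem.Chars.endswith_iff] using h ext (by simp))]
      exact ih (fun e he => h e (List.mem_cons_of_mem _ he))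

theorem pvInter_singleton (t : List Char) : ['.'].intercalate [t] = t := by
  simp [List.intercalate, List.intersperse]

theorem pvMain : ∀ (n : Nat) (ts : List (List Char)), ts.length = n → ts ≠ [] →
    (∀ t ∈ ts, '.' ∉ t) →
    pvStripCore (['.'].intercalate ts) = ['.'].intercalate (pvPopLoop ts) := by
  intro n
  induction n using Nat.strong_induction_on with
  | _ n ih =>
    intro ts hlen hne hfree
    rw [pvPopLoop]
    have hgD : ts.getLastD [] = ts.getLast hne := by
      rw [List.getLastD_eq_getLast?, List.getLast?_eq_getLast hne]; rfl
    by_cases hc : 1 < ts.length ∧ ('.' :: PySem.Chars.lower (ts.getLastD [])) ∈ pvKnownSet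
    · rw [if_pos hc]
      obtain ⟨hlt, hmem⟩ := hc
      set g := ts.getLast hne with hg
      have hlast : ts.dropLast ++ [g] = ts := List.dropLast_append_getLast hne
      have hdne : ts.dropLast ≠ [] := by
        intro h
        have := congrArg List.length hlast
        simp [h] at this
        omega
      have hinter : ['.'].intercalate ts = ['.'].intercalate ts.dropLast ++ '.' :: g := by
        conv_lhs => rw [← hlast]
        exact pvInter_snoc _ _ hdne
      have hgfree : '.' ∉ g := hfree g (List.getLast_mem hne)
      have hlow : PySem.Chars.lower (['.'].intercalate ts) =
          PySem.Chars.lower (['.'].intercalate ts.dropLast) ++ '.' :: PySem.Chars.lower g := by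
        rw [hinter, pvLower_append_dot]
      have hstep := pvTryStrip_char pvKnownA pvKnownA_shape _ _ _ hlow
        (pvLower_dot_free hgfree)
      have hmem' : ('.' :: PySem.Chars.lower g) ∈ pvKnownA := by
        rw [← pvKnown_eq]
        rw [hgD] at hmem
        exact hmem
      rw [if_pos hmem'] at hstep
      have hlg : (PySem.Chars.lower g).length = g.length := by
        simp [PySem.Chars.lower]
      have hslice : PySem.Chars.slice (['.'].intercalate ts) none
          (some (-(((PySem.Chars.lower g).length : Int) + 1))) = ['.'].intercalate ts.dropLast := by
        simp only [PySem.Chars.slice_eq_listSlice]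
        have hcast : (-(((PySem.Chars.lower g).length : Int) + 1)) = (-((g.length + 1 : Nat) : Int)) := by
          rw [hlg]; push_cast; ring
        rw [hcast, pvSlice_neg _ _ (by omega) (by rw [hinter]; simp)]
        rw [hinter]
        have : (['.'].intercalate ts.dropLast ++ '.' :: g).length - (g.length + 1) =
            (['.'].intercalate ts.dropLast).length := by simp
        rw [this]
        exact List.take_left
      rw [hslice] at hstep
      rw [pvStripCore_some hstep]
      exact ih (n - 1) (by omega) ts.dropLast (by simp [List.length_dropLast]; omega) hdne
        (fun t ht => hfree t ((List.dropLast_sublist ts).subset ht))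
    · rw [if_neg hc]
      by_cases h1 : 1 < ts.length
      · have hmem : ('.' :: PySem.Chars.lower (ts.getLastD [])) ∉ pvKnownSet := fun hm => hc ⟨h1, hm⟩
        set g := ts.getLast hne with hg
        have hlast : ts.dropLast ++ [g] = ts := List.dropLast_append_getLast hne
        have hdne : ts.dropLast ≠ [] := by
          intro h
          have := congrArg List.length hlast
          simp [h] at this
          omega
        have hinter : ['.'].intercalate ts = ['.'].intercalate ts.dropLast ++ '.' :: g := by
          conv_lhs => rw [← hlast]
          exact pvInter_snoc _ _ hdne
        have hgfree : '.' ∉ g := hfree g (List.getLast_mem hne)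
        have hlow : PySem.Chars.lower (['.'].intercalate ts) =
            PySem.Chars.lower (['.'].intercalate ts.dropLast) ++ '.' :: PySem.Chars.lower g := by
          rw [hinter, pvLower_append_dot]
        have hstep := pvTryStrip_char pvKnownA pvKnownA_shape _ _ _ hlow
          (pvLower_dot_free hgfree)
        have hmem' : ('.' :: PySem.Chars.lower g) ∉ pvKnownA := by
          rw [← pvKnown_eq]
          rw [hgD] at hmem
          exact hmem
        rw [if_neg hmem'] at hstep
        exact pvStripCore_none hstep
      · obtain ⟨t, hts⟩ : ∃ t, ts = [t] := by
          cases ts with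
          | nil => exact absurd rfl hne
          | cons a l =>
              cases l with
              | nil => exact ⟨a, rfl⟩
              | cons b l' => simp at h1
        subst hts
        rw [pvInter_singleton]
        apply pvStripCore_none
        apply pvTryStrip_none
        intro ext hx hsuf
        obtain ⟨e, hee, -⟩ := pvKnownA_shape ext hx
        have : '.' ∈ PySem.Chars.lower t := hsuf.subset (by simp [hee])
        exact pvLower_dot_free (hfree t (by simp)) this

-- ===== VERDICT (by name: the statement is the Claim_ definition above) =====
theorem strip_known_extensions_spec : Claim_equal_strip_known_extensions := by
  intro filename _
  unfold Spec_strip_known_extensions strip_known_extensions strip_known_extensions_alt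
  rw [pvSplitOn_dot]
  have hne := List.splitOnP_ne_nil (· == '.') filename.toList
  have hfree := pvSplit_dot_free filename.toList
  have hider : ['.'].intercalate (filename.toList.splitOnP (· == '.')) = filename.toList :=
    List.intercalate_splitOn filename.toList '.'
  rw [show PySem.Chars.join ['.'] (pvPopLoop (filename.toList.splitOnP (· == '.'))) =
      ['.'].intercalate (pvPopLoop (filename.toList.splitOnP (· == '.'))) from rfl]
  rw [← pvMain _ _ rfl hne hfree, hider]
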